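-- pv_equiv track=rewrite | github.com/hinoneko/Lab3 | .venv/Lab_4.py | condensation_matrix
-- ===== SOURCE A (Python) =====
-- def condensation_matrix(matrix, components):
--     num_vertices = len(components)
--     condensation_matrix = [[0] * num_vertices for _ in range(num_vertices)]
--
--     # Створюємо словник для швидкого доступу до індексів вершин у компоненті
--     vertex_index = {}
--     for index, component in enumerate(components):
--         for vertex in component:
--             vertex_index[vertex] = index
--
--     # Заповнюємо матрицю конденсації
--     for i in range(len(matrix)):
--         for j in range(len(matrix[i])):
--             if matrix[i][j]:
--                 index_com_i = vertex_index[i + 1]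
--                 index_com_j = vertex_index[j + 1]
--                 if index_com_i != index_com_j:
--                     condensation_matrix[index_com_i][index_com_j] = 1
--
--     return condensation_matrix
-- ===== SOURCE B (Python) =====
-- def condensation_matrix(matrix, components):
--     comp_of = {v: k for k, comp in enumerate(components) for v in comp}
--     edges = {(i + 1, j + 1) for i, row in enumerate(matrix) for j, x in enumerate(row) if x}
--     cpairs = {(comp_of[u], comp_of[v]) for u, v in edges}
--     n = len(components)
--     return [[1 if ci != cj and (ci, cj) in cpairs else 0 for cj in range(n)]
--             for ci in range(n)]
-- ===== Notes on version B (the rewrite author's own statement) =====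
-- stated objective: idiomatic
-- what changed: B replaces A's preallocate-and-mutate cell scan (zero matrix updated in place through a vertex->index dict as cells are visited) with a three-stage comprehension pipeline: a set of edge vertex pairs, a set of distinct cross-component index pairs mapped through the component index, and the output matrix rendered by a nested comprehension testing membership in that set; no in-place writes and the edge set is deduplicated before component lookups.
import Mathlib
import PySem

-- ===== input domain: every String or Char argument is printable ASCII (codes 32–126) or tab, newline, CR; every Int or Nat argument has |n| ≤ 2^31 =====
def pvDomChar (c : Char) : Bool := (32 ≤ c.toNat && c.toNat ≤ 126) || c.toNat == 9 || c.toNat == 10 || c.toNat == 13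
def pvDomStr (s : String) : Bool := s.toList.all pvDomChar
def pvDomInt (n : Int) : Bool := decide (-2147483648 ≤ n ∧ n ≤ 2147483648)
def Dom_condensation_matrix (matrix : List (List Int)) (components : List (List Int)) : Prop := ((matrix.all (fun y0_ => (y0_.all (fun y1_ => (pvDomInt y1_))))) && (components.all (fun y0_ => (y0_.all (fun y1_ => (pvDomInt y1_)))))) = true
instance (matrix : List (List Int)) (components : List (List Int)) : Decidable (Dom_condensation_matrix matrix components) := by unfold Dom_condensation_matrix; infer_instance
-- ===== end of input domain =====

-- B drops A's flat scan of all matrix cells through a vertex→component dict and instead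
-- tests, for each ordered pair of distinct components, whether any cross edge exists
-- (objective: alternative decomposition, not faster).

-- B replaces A's preallocate-and-mutate cell scan with a three-stage pipeline (edge set,
-- component-pair set, comprehension-rendered matrix); same results, no in-place writes.

-- ===== PORT A =====
-- vertex_index = {}; for index, component in enumerate(components): for vertex in component: vertex_index[vertex] = index
def pvBuildIndex (components : List (List Int)) : PySem.Dict Int Int :=
  (PySem.List.enumerate components).foldl
    (fun d p => p.2.foldl (fun d v => d.insert v p.1) d) PySem.Dict.empty

def condensation_matrix (matrix : List (List Int)) (components : List (List Int)) : List (List Int) :=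
  let num_vertices := components.length
  let cm0 := (List.range num_vertices).map (fun _ => List.replicate num_vertices (0 : Int))
  let vi := pvBuildIndex components
  (List.range matrix.length).foldl (fun cm i =>
    (List.range (matrix.getD i []).length).foldl (fun cm j =>
      if (matrix.getD i []).getD j 0 ≠ 0 then
        match vi.get? ((i : Int) + 1), vi.get? ((j : Int) + 1) with
        | some a, some b =>
            -- dict values come from enumerate, hence are ≥ 0: .toNat is Python's exact index
            if a ≠ b then cm.modify a.toNat (fun r => r.set b.toNat 1) else cm
        | _, _ => cm  -- Python raises KeyError here; excluded by Pre_
      else cm) cm) cm0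

-- ===== PORT B =====
-- comp_of = {v: k for k, comp in enumerate(components) for v in comp}
-- (the dict comprehension: the stream of (vertex, index) pairs, made a dict — later pairs win)
def pvCompOf (components : List (List Int)) : PySem.Dict Int Int :=
  PySem.Dict.ofList
    ((PySem.List.enumerate components).flatMap (fun p => p.2.map (fun v => (v, p.1))))

-- edges = {(i + 1, j + 1) for i, row in enumerate(matrix) for j, x in enumerate(row) if x}
def pvEdges (matrix : List (List Int)) : PySem.Set (Int × Int) :=
  (PySem.List.enumerate matrix).foldl (fun s p =>
    (PySem.List.enumerate p.2).foldl (fun s q =>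
      if q.2 ≠ 0 then PySem.Set.add s (p.1 + 1, q.1 + 1) else s) s)
    PySem.Set.empty

-- cpairs = {(comp_of[u], comp_of[v]) for u, v in edges}
def pvCPairs (matrix : List (List Int)) (components : List (List Int)) : PySem.Set (Int × Int) :=
  (pvEdges matrix).foldl (fun s uv =>
    match (pvCompOf components).get? uv.1 with
    | none => s  -- Python raises KeyError here; excluded by Pre_
    | some a =>
      match (pvCompOf components).get? uv.2 with
      | none => s  -- Python raises KeyError here; excluded by Pre_
      | some b => PySem.Set.add s (a, b)) PySem.Set.empty

def condensation_matrix_alt (matrix : List (List Int)) (components : List (List Int)) : List (List Int) :=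
  let n := components.length
  (List.range n).map (fun (ci : Nat) =>
    (List.range n).map (fun (cj : Nat) =>
      if ci ≠ cj ∧ ((ci : Int), (cj : Int)) ∈ pvCPairs matrix components then 1 else 0))

-- ===== PRECONDITION & SPEC =====
-- Pre_ excludes exactly the inputs where both Pythons raise KeyError: a truthy cell
-- matrix[i][j] whose row vertex i+1 or column vertex j+1 occurs in no component.
def Pre_condensation_matrix (matrix : List (List Int)) (components : List (List Int)) : Prop :=
  ∀ i ∈ List.range matrix.length, ∀ j ∈ List.range (matrix.getD i []).length,
      (matrix.getD i []).getD j 0 ≠ 0 →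
      ((i : Int) + 1) ∈ components.flatten ∧ ((j : Int) + 1) ∈ components.flatten

instance (matrix : List (List Int)) (components : List (List Int)) : Decidable (Pre_condensation_matrix matrix components) := by
  unfold Pre_condensation_matrix; infer_instance

def pvWitness_condensation_matrix : List (List Int) × List (List Int) :=
  ([[0, 1], [1, 0]], [[1], [2]])

def Spec_condensation_matrix (matrix : List (List Int)) (components : List (List Int)) (out : List (List Int)) : Prop := out = condensation_matrix_alt matrix components
instance (matrix : List (List Int)) (components : List (List Int)) (out : List (List Int)) : Decidable (Spec_condensation_matrix matrix components out) := by unfold Spec_condensation_matrix; infer_instance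

-- ===== CLAIM (what is proved, stated in full; the proofs are below) =====
def Claim_equal_condensation_matrix : Prop := ∀ (matrix : List (List Int)) (components : List (List Int)), Dom_condensation_matrix matrix components → Pre_condensation_matrix matrix components → Spec_condensation_matrix matrix components (condensation_matrix matrix components)

-- ===== LEMMAS AND PROOFS =====

-- entry (p,q) of a matrix-of-lists, 0 outside
def pvEntry (cm : List (List Int)) (p q : Nat) : Int := (cm.getD p []).getD q 0

-- the write A performs for cell (i,j), if any: the (row, col) pair it sets to 1
def pvHit (matrix : List (List Int)) (vi : PySem.Dict Int Int) (i j : Nat) : Option (Nat × Nat) :=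
  if (matrix.getD i []).getD j 0 ≠ 0 then
    match vi.get? ((i : Int) + 1), vi.get? ((j : Int) + 1) with
    | some a, some b => if a ≠ b then some (a.toNat, b.toNat) else none
    | _, _ => none
  else none

def pvApply (cm : List (List Int)) (o : Option (Nat × Nat)) : List (List Int) :=
  match o with
  | some (a, b) => cm.modify a (fun r => r.set b 1)
  | none => cm

lemma pvApply_length (cm : List (List Int)) (o : Option (Nat × Nat)) :
    (pvApply cm o).length = cm.length := by
  cases o with
  | none => rfl
  | some ab => cases ab; simp [pvApply]

lemma pvApply_rowlen (cm : List (List Int)) (o : Option (Nat × Nat)) (p : Nat) :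
    ((pvApply cm o).getD p []).length = ((cm.getD p []).length) := by
  cases o with
  | none => rfl
  | some ab =>
    obtain ⟨a, b⟩ := ab
    simp only [pvApply, List.getD, List.getElem?_modify]
    cases h : cm[p]? with
    | none => simp
    | some r => by_cases hap : a = p <;> simp [hap]

lemma pvEntry_pvApply (cm : List (List Int)) (a b p q : Nat)
    (ha : a < cm.length) (hb : b < (cm.getD a []).length) :
    pvEntry (pvApply cm (some (a, b))) p q = if p = a ∧ q = b then 1 else pvEntry cm p q := by
  obtain ⟨r, hcp⟩ : ∃ r, cm[a]? = some r := ⟨_, List.getElem?_eq_getElem ha⟩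
  have hr : cm.getD a [] = r := by simp [List.getD, hcp]
  rw [hr] at hb
  simp only [pvEntry, pvApply, List.getD, List.getElem?_modify]
  by_cases hpa : p = a
  · subst hpa
    rw [hcp]
    simp only [Option.getD_some]
    by_cases hqb : q = b
    · subst hqb
      simp [hb]
    · have hbq : ¬ b = q := fun h => hqb h.symm
      simp [hbq, hqb]
  · have hap : ¬ a = p := fun h => hpa h.symm
    cases hc : cm[p]? <;> simp [hap, hpa]

-- inner fold over a list of column indices
lemma pvFold_inner (f : Nat → Option (Nat × Nat)) (js : List Nat) :
    ∀ (cm : List (List Int)) (p q : Nat),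
    (∀ j ∈ js, ∀ a b, f j = some (a, b) → a < cm.length ∧ b < (cm.getD a []).length) →
    pvEntry (js.foldl (fun cm j => pvApply cm (f j)) cm) p q
      = if ∃ j ∈ js, f j = some (p, q) then 1 else pvEntry cm p q := by
  induction js with
  | nil => intro cm p q _; simp
  | cons j js ih =>
    intro cm p q hb
    simp only [List.foldl_cons]
    rw [ih _ p q (by
      intro j' hj' a b hf
      have h := hb j' (List.mem_cons_of_mem _ hj') a b hf
      exact ⟨by rw [pvApply_length]; exact h.1, by rw [pvApply_rowlen]; exact h.2⟩)]
    by_cases hex : ∃ j' ∈ js, f j' = some (p, q)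
    · have hex' : ∃ j' ∈ j :: js, f j' = some (p, q) :=
        hex.imp (fun j' h => ⟨List.mem_cons_of_mem _ h.1, h.2⟩)
      rw [if_pos hex, if_pos hex']
    · rw [if_neg hex]
      cases hfj : f j with
      | none =>
        have hex' : ¬ ∃ j' ∈ j :: js, f j' = some (p, q) := by
          rintro ⟨j', hj', hf⟩
          rcases List.mem_cons.mp hj' with rfl | hm
          · rw [hfj] at hf; exact absurd hf (by simp)
          · exact hex ⟨j', hm, hf⟩
        rw [if_neg hex']; simp [pvApply]
      | some ab =>
        obtain ⟨a, b⟩ := ab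
        have hab := hb j List.mem_cons_self a b hfj
        rw [pvEntry_pvApply cm a b p q hab.1 hab.2]
        by_cases hpq : p = a ∧ q = b
        · obtain ⟨rfl, rfl⟩ := hpq
          have hex' : ∃ j' ∈ j :: js, f j' = some (p, q) := ⟨j, List.mem_cons_self, hfj⟩
          rw [if_pos ⟨rfl, rfl⟩, if_pos hex']
        · rw [if_neg hpq]
          have hex' : ¬ ∃ j' ∈ j :: js, f j' = some (p, q) := by
            rintro ⟨j', hj', hf⟩
            rcases List.mem_cons.mp hj' with rfl | hm
            · rw [hfj] at hf
              simp only [Option.some.injEq, Prod.mk.injEq] at hf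
              exact hpq ⟨hf.1.symm, hf.2.symm⟩
            · exact hex ⟨j', hm, hf⟩
          rw [if_neg hex']

lemma pvStepA_eq (matrix : List (List Int)) (vi : PySem.Dict Int Int) (i j : Nat)
    (cm : List (List Int)) :
    (if (matrix.getD i []).getD j 0 ≠ 0 then
        match vi.get? ((i : Int) + 1), vi.get? ((j : Int) + 1) with
        | some a, some b =>
            if a ≠ b then cm.modify a.toNat (fun r => r.set b.toNat 1) else cm
        | _, _ => cm
      else cm) = pvApply cm (pvHit matrix vi i j) := by
  unfold pvHit
  by_cases h : (matrix.getD i []).getD j 0 ≠ 0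
  · simp only [if_pos h]
    cases hA : vi.get? ((i : Int) + 1) with
    | none => simp [pvApply]
    | some a =>
      cases hB : vi.get? ((j : Int) + 1) with
      | none => simp [pvApply]
      | some b =>
        by_cases hab : a ≠ b
        · simp [hab, pvApply]
        · simp [hab, pvApply]
  · rw [if_neg h, if_neg h]; rfl

def pvShape (cm : List (List Int)) (N : Nat) : Prop :=
  cm.length = N ∧ ∀ p < N, (cm.getD p []).length = N

lemma pvShape_pvApply (cm : List (List Int)) (o : Option (Nat × Nat)) (N : Nat)
    (h : pvShape cm N) : pvShape (pvApply cm o) N := by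
  refine ⟨by rw [pvApply_length]; exact h.1, ?_⟩
  intro p hp
  rw [pvApply_rowlen]; exact h.2 p hp

lemma pvShape_fold (f : Nat → Option (Nat × Nat)) (js : List Nat) (N : Nat) :
    ∀ cm, pvShape cm N → pvShape (js.foldl (fun cm j => pvApply cm (f j)) cm) N := by
  induction js with
  | nil => intro cm h; exact h
  | cons j js ih => intro cm h; exact ih _ (pvShape_pvApply cm (f j) N h)

lemma pvShape_fold_outer (matrix : List (List Int)) (vi : PySem.Dict Int Int)
    (is : List Nat) (N : Nat) :
    ∀ cm, pvShape cm N →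
    pvShape (is.foldl (fun cm i =>
      (List.range (matrix.getD i []).length).foldl
        (fun cm j => pvApply cm (pvHit matrix vi i j)) cm) cm) N := by
  induction is with
  | nil => intro cm h; exact h
  | cons i is ih => intro cm h; exact ih _ (pvShape_fold _ _ N cm h)

lemma pvFold_outer (matrix : List (List Int)) (vi : PySem.Dict Int Int) (N : Nat)
    (hhit : ∀ i j a b, pvHit matrix vi i j = some (a, b) → a < N ∧ b < N)
    (is : List Nat) :
    ∀ (cm : List (List Int)) (p q : Nat), pvShape cm N →
    pvEntry (is.foldl (fun cm i =>
      (List.range (matrix.getD i []).length).foldl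
        (fun cm j => pvApply cm (pvHit matrix vi i j)) cm) cm) p q
      = if ∃ i ∈ is, ∃ j ∈ List.range (matrix.getD i []).length, pvHit matrix vi i j = some (p, q)
        then 1 else pvEntry cm p q := by
  induction is with
  | nil => intro cm p q _; simp
  | cons i is ih =>
    intro cm p q hsh
    simp only [List.foldl_cons]
    rw [ih _ p q (pvShape_fold _ _ N cm hsh)]
    rw [pvFold_inner (pvHit matrix vi i) (List.range (matrix.getD i []).length) cm p q
      (fun j _ a b hf => by
        obtain ⟨ha1, hb1⟩ := hhit i j a b hf
        refine ⟨?_, ?_⟩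
        · rw [hsh.1]; exact ha1
        · rw [hsh.2 a ha1]; exact hb1)]
    by_cases htail : ∃ i' ∈ is, ∃ j ∈ List.range (matrix.getD i' []).length,
        pvHit matrix vi i' j = some (p, q)
    · have hcons : ∃ i' ∈ i :: is, ∃ j ∈ List.range (matrix.getD i' []).length,
          pvHit matrix vi i' j = some (p, q) :=
        htail.imp (fun i' h => ⟨List.mem_cons_of_mem _ h.1, h.2⟩)
      rw [if_pos htail, if_pos hcons]
    · rw [if_neg htail]
      by_cases hhead : ∃ j ∈ List.range (matrix.getD i []).length, pvHit matrix vi i j = some (p, q)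
      · have hcons : ∃ i' ∈ i :: is, ∃ j ∈ List.range (matrix.getD i' []).length,
            pvHit matrix vi i' j = some (p, q) := ⟨i, List.mem_cons_self, hhead⟩
        rw [if_pos hhead, if_pos hcons]
      · have hcons : ¬ ∃ i' ∈ i :: is, ∃ j ∈ List.range (matrix.getD i' []).length,
            pvHit matrix vi i' j = some (p, q) := by
          rintro ⟨i', hi', hrest⟩
          rcases List.mem_cons.mp hi' with rfl | hm
          · exact hhead hrest
          · exact htail ⟨i', hm, hrest⟩
        rw [if_neg hhead, if_neg hcons]
lemma pvCompOf_eq (components : List (List Int)) :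
    pvCompOf components = pvBuildIndex components := by
  unfold pvCompOf pvBuildIndex PySem.Dict.ofList PySem.Dict.update
  rw [List.foldl_flatMap]
  simp only [List.foldl_map]

lemma pvInner_get (ix : Int) (vs : List Int) :
    ∀ (d : PySem.Dict Int Int) (v a : Int),
    (vs.foldl (fun d v => d.insert v ix) d).get? v = some a →
    d.get? v = some a ∨ (a = ix ∧ v ∈ vs) := by
  induction vs with
  | nil => intro d v a h; exact Or.inl h
  | cons w vs ih =>
    intro d v a h
    rcases ih _ v a h with h' | h'
    · by_cases hvw : v = w
      · subst hvw
        rw [PySem.Dict.get?_insert_self] at h'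
        exact Or.inr ⟨(Option.some.inj h').symm, List.mem_cons_self⟩
      · rw [PySem.Dict.get?_insert_of_ne _ _ hvw] at h'
        exact Or.inl h'
    · exact Or.inr ⟨h'.1, List.mem_cons_of_mem _ h'.2⟩

lemma pvBuild_get (l : List (Int × List Int)) :
    ∀ (d : PySem.Dict Int Int) (v a : Int),
    (l.foldl (fun d p => p.2.foldl (fun d v => d.insert v p.1) d) d).get? v = some a →
    d.get? v = some a ∨ ∃ p ∈ l, a = p.1 ∧ v ∈ p.2 := by
  induction l with
  | nil => intro d v a h; exact Or.inl h
  | cons p l ih =>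
    intro d v a h
    rcases ih _ v a h with h' | h'
    · rcases pvInner_get p.1 p.2 d v a h' with h'' | h''
      · exact Or.inl h''
      · exact Or.inr ⟨p, List.mem_cons_self, h''⟩
    · exact Or.inr (h'.imp (fun p' hp' => ⟨List.mem_cons_of_mem _ hp'.1, hp'.2⟩))

lemma pvMem_enumerate {α : Type} (xs : List α) :
    ∀ (s : Int) (p : Int × α), p ∈ PySem.List.enumerate xs s →
    ∃ k : Nat, xs[k]? = some p.2 ∧ p.1 = s + k := by
  induction xs with
  | nil => intro s p h; rw [PySem.List.enumerate_nil] at h; exact absurd h List.not_mem_nil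
  | cons x xs ih =>
    intro s p h
    rw [PySem.List.enumerate_cons] at h
    rcases List.mem_cons.mp h with rfl | hm
    · exact ⟨0, by simp⟩
    · obtain ⟨k, hk1, hk2⟩ := ih (s + 1) p hm
      exact ⟨k + 1, by simpa using hk1, by push_cast; omega⟩

lemma pvEnumerate_mem {α : Type} (xs : List α) :
    ∀ (s : Int) (k : Nat) (x : α), xs[k]? = some x →
    ((s + k : Int), x) ∈ PySem.List.enumerate xs s := by
  induction xs with
  | nil => intro s k x h; simp at h
  | cons y xs ih =>
    intro s k x h
    rw [PySem.List.enumerate_cons]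
    cases k with
    | zero =>
      simp at h
      subst h
      have : (s + (0 : Nat) : Int) = s := by push_cast; omega
      rw [this]; exact List.mem_cons_self
    | succ k =>
      simp only [List.getElem?_cons_succ] at h
      have := ih (s + 1) k x h
      have harith : (s + (k + 1 : Nat) : Int) = s + 1 + k := by push_cast; omega
      rw [harith]
      exact List.mem_cons_of_mem _ this

lemma pvVi_some (components : List (List Int)) (v a : Int)
    (h : (pvBuildIndex components).get? v = some a) :
    ∃ k : Nat, k < components.length ∧ a = (k : Int) ∧ v ∈ components.getD k [] := by
  unfold pvBuildIndex at h
  rcases pvBuild_get _ _ v a h with h' | h'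
  · rw [PySem.Dict.get?_empty] at h'; exact absurd h' (by simp)
  · obtain ⟨p, hp, rfl, hv⟩ := h'
    obtain ⟨k, hk1, hk2⟩ := pvMem_enumerate components 0 p hp
    have hlt : k < components.length := by
      by_contra hge
      rw [List.getElem?_eq_none_iff.mpr (le_of_not_gt hge)] at hk1
      exact absurd hk1 (by simp)
    refine ⟨k, hlt, by omega, ?_⟩
    have : components.getD k [] = p.2 := by simp [List.getD, hk1]
    rw [this]; exact hv

lemma pvHit_bounds (matrix components : List (List Int)) (i j a b : Nat)
    (h : pvHit matrix (pvBuildIndex components) i j = some (a, b)) :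
    a < components.length ∧ b < components.length := by
  unfold pvHit at h
  by_cases hcell : (matrix.getD i []).getD j 0 ≠ 0
  · rw [if_pos hcell] at h
    cases hA : (pvBuildIndex components).get? ((i : Int) + 1) with
    | none => rw [hA] at h; simp at h
    | some A =>
      cases hB : (pvBuildIndex components).get? ((j : Int) + 1) with
      | none => rw [hA, hB] at h; simp at h
      | some B =>
        rw [hA, hB] at h
        replace h : (if A ≠ B then some (A.toNat, B.toNat) else none) = some (a, b) := h
        by_cases hab : A ≠ B
        · rw [if_pos hab] at h
          obtain ⟨kA, hkA, rfl, -⟩ := pvVi_some components _ A hA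
          obtain ⟨kB, hkB, rfl, -⟩ := pvVi_some components _ B hB
          simp at h
          omega
        · rw [if_neg hab] at h; exact absurd h (by simp)
  · rw [if_neg hcell] at h; simp at h

lemma pvA_eq_fold (matrix components : List (List Int)) :
    condensation_matrix matrix components
      = (List.range matrix.length).foldl (fun cm i =>
          (List.range (matrix.getD i []).length).foldl
            (fun cm j => pvApply cm (pvHit matrix (pvBuildIndex components) i j)) cm)
          ((List.range components.length).map
            (fun _ => List.replicate components.length (0 : Int))) := by
  unfold condensation_matrix
  dsimp only
  congr 1
  funext cm i
  congr 1
  funext cm j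
  exact pvStepA_eq matrix (pvBuildIndex components) i j cm

lemma pvShape_zero (n : Nat) :
    pvShape ((List.range n).map (fun _ => List.replicate n (0 : Int))) n := by
  refine ⟨by simp, ?_⟩
  intro p hp
  rw [List.getD_eq_getElem _ _ (by simpa using hp)]
  simp

lemma pvEntry_zero (n : Nat) (p q : Nat) :
    pvEntry ((List.range n).map (fun _ => List.replicate n (0 : Int))) p q = 0 := by
  have hrow : ((List.range n).map (fun _ => List.replicate n (0 : Int))).getD p []
        = List.replicate n 0
      ∨ ((List.range n).map (fun _ => List.replicate n (0 : Int))).getD p [] = [] := by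
    by_cases hp : p < n
    · left; rw [List.getD_eq_getElem _ _ (by simpa using hp)]; simp
    · right
      simp [List.getD, hp]
  unfold pvEntry
  rcases hrow with h | h <;> rw [h]
  · by_cases hq : q < n
    · rw [List.getD_eq_getElem _ _ (by simpa using hq)]; simp
    · simp [List.getD, hq]
  · rfl

lemma pvA_entry (matrix components : List (List Int)) (p q : Nat) :
    pvEntry (condensation_matrix matrix components) p q
      = if ∃ i ∈ List.range matrix.length, ∃ j ∈ List.range (matrix.getD i []).length,
            pvHit matrix (pvBuildIndex components) i j = some (p, q)
        then 1 else 0 := by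
  rw [pvA_eq_fold]
  rw [pvFold_outer matrix (pvBuildIndex components) components.length
      (fun i j a b h => pvHit_bounds matrix components i j a b h)
      (List.range matrix.length) _ p q (pvShape_zero components.length)]
  rw [pvEntry_zero]

lemma pvShape_A (matrix components : List (List Int)) :
    pvShape (condensation_matrix matrix components) components.length := by
  rw [pvA_eq_fold]
  exact pvShape_fold_outer matrix (pvBuildIndex components) (List.range matrix.length)
    components.length _ (pvShape_zero components.length)

lemma pvB_row (matrix components : List (List Int)) (p : Nat) (hp : p < components.length) :
    (condensation_matrix_alt matrix components).getD p []
      = (List.range components.length).map (fun cj =>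
          if p ≠ cj ∧ ((p : Int), (cj : Int)) ∈ pvCPairs matrix components then (1 : Int) else 0) := by
  unfold condensation_matrix_alt
  simp only [List.getD, List.getElem?_map, List.getElem?_range hp, Option.map_some,
    Option.getD_some]

lemma pvShape_B (matrix components : List (List Int)) :
    pvShape (condensation_matrix_alt matrix components) components.length := by
  refine ⟨by unfold condensation_matrix_alt; simp, ?_⟩
  intro p hp
  rw [pvB_row matrix components p hp]
  simp

lemma pvB_entry (matrix components : List (List Int)) (p q : Nat)
    (hp : p < components.length) (hq : q < components.length) :
    pvEntry (condensation_matrix_alt matrix components) p q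
      = if p ≠ q ∧ ((p : Int), (q : Int)) ∈ pvCPairs matrix components then 1 else 0 := by
  unfold pvEntry
  rw [pvB_row matrix components p hp]
  rw [List.getD_eq_getElem _ _ (by simpa using hq)]
  simp

-- membership in a fold of conditional set-inserts
lemma pvMem_fold_add {α β : Type} [BEq β] [LawfulBEq β] (c : α → Prop) [DecidablePred c]
    (f : α → β) (l : List α) :
    ∀ (s0 : PySem.Set β) (x : β),
    x ∈ (l.foldl (fun s a => if c a then PySem.Set.add s (f a) else s) s0)
      ↔ x ∈ s0 ∨ ∃ a ∈ l, c a ∧ x = f a := by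
  induction l with
  | nil => intro s0 x; simp
  | cons a l ih =>
    intro s0 x
    simp only [List.foldl_cons]
    rw [ih]
    by_cases hc : c a
    · rw [if_pos hc]
      rw [PySem.Set.mem_add]
      constructor
      · rintro ((h | h) | h)
        · exact Or.inl h
        · exact Or.inr ⟨a, List.mem_cons_self, hc, h⟩
        · exact Or.inr (h.imp (fun a' h' => ⟨List.mem_cons_of_mem _ h'.1, h'.2⟩))
      · rintro (h | ⟨a', ha', hc', hx⟩)
        · exact Or.inl (Or.inl h)
        · rcases List.mem_cons.mp ha' with rfl | hm
          · exact Or.inl (Or.inr hx)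
          · exact Or.inr ⟨a', hm, hc', hx⟩
    · rw [if_neg hc]
      constructor
      · rintro (h | ⟨a', ha', hc', hx⟩)
        · exact Or.inl h
        · exact Or.inr ⟨a', List.mem_cons_of_mem _ ha', hc', hx⟩
      · rintro (h | ⟨a', ha', hc', hx⟩)
        · exact Or.inl h
        · rcases List.mem_cons.mp ha' with rfl | hm
          · exact absurd hc' hc
          · exact Or.inr ⟨a', hm, hc', hx⟩

lemma pvMem_edges_fold (l : List (Int × List Int)) :
    ∀ (s0 : PySem.Set (Int × Int)) (x : Int × Int),
    x ∈ (l.foldl (fun s p =>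
        (PySem.List.enumerate p.2).foldl (fun s q =>
          if q.2 ≠ 0 then PySem.Set.add s (p.1 + 1, q.1 + 1) else s) s) s0)
      ↔ x ∈ s0 ∨ ∃ p ∈ l, ∃ q ∈ PySem.List.enumerate p.2, q.2 ≠ 0 ∧ x = (p.1 + 1, q.1 + 1) := by
  induction l with
  | nil => intro s0 x; simp
  | cons p l ih =>
    intro s0 x
    simp only [List.foldl_cons]
    rw [ih]
    rw [pvMem_fold_add (fun q : Int × Int => q.2 ≠ 0) (fun q => (p.1 + 1, q.1 + 1))]
    constructor
    · rintro ((h | ⟨q, hq, hq0, hx⟩) | ⟨p', hp', hrest⟩)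
      · exact Or.inl h
      · exact Or.inr ⟨p, List.mem_cons_self, q, hq, hq0, hx⟩
      · exact Or.inr ⟨p', List.mem_cons_of_mem _ hp', hrest⟩
    · rintro (h | ⟨p', hp', q, hq, hq0, hx⟩)
      · exact Or.inl (Or.inl h)
      · rcases List.mem_cons.mp hp' with rfl | hm
        · exact Or.inl (Or.inr ⟨q, hq, hq0, hx⟩)
        · exact Or.inr ⟨p', hm, q, hq, hq0, hx⟩

lemma pvMem_edges (matrix : List (List Int)) (u v : Int) :
    (u, v) ∈ pvEdges matrix
      ↔ ∃ i ∈ List.range matrix.length, ∃ j ∈ List.range (matrix.getD i []).length,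
          (matrix.getD i []).getD j 0 ≠ 0 ∧ u = (i : Int) + 1 ∧ v = (j : Int) + 1 := by
  unfold pvEdges
  rw [pvMem_edges_fold]
  constructor
  · rintro (h | ⟨p, hp, q, hq, hq0, hx⟩)
    · exact absurd h (by simp [PySem.Set.empty])
    · obtain ⟨i, hi1, hi2⟩ := pvMem_enumerate matrix 0 p hp
      have hilt : i < matrix.length := by
        by_contra hge
        rw [List.getElem?_eq_none_iff.mpr (le_of_not_gt hge)] at hi1
        exact absurd hi1 (by simp)
      have hrow : matrix.getD i [] = p.2 := by simp [List.getD, hi1]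
      obtain ⟨j, hj1, hj2⟩ := pvMem_enumerate p.2 0 q hq
      have hjlt : j < p.2.length := by
        by_contra hge
        rw [List.getElem?_eq_none_iff.mpr (le_of_not_gt hge)] at hj1
        exact absurd hj1 (by simp)
      have hcell : (matrix.getD i []).getD j 0 = q.2 := by
        rw [hrow]; simp [List.getD, hj1]
      have hu := congrArg Prod.fst hx
      have hv := congrArg Prod.snd hx
      simp only at hu hv
      refine ⟨i, List.mem_range.mpr hilt, j, List.mem_range.mpr (by rw [hrow]; exact hjlt),
        by rw [hcell]; exact hq0, by omega, by omega⟩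
  · rintro ⟨i, hi, j, hj, hc, rfl, rfl⟩
    rw [List.mem_range] at hi hj
    right
    have hrow : matrix[i]? = some (matrix.getD i []) := by
      rw [List.getD_eq_getElem _ _ hi]; exact List.getElem?_eq_getElem hi
    have hpmem : ((i : Int), matrix.getD i []) ∈ PySem.List.enumerate matrix 0 := by
      have := pvEnumerate_mem matrix 0 i _ hrow
      simpa using this
    have hcell : (matrix.getD i [])[j]? = some ((matrix.getD i []).getD j 0) := by
      rw [List.getD_eq_getElem _ _ hj]; exact List.getElem?_eq_getElem hj
    have hqmem : ((j : Int), (matrix.getD i []).getD j 0)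
        ∈ PySem.List.enumerate (matrix.getD i []) 0 := by
      have := pvEnumerate_mem _ 0 j _ hcell
      simpa using this
    exact ⟨((i : Int), matrix.getD i []), hpmem,
      ((j : Int), (matrix.getD i []).getD j 0), hqmem, hc, by simp⟩

lemma pvMem_cpairs (matrix components : List (List Int)) (a b : Int) :
    (a, b) ∈ pvCPairs matrix components
      ↔ ∃ uv ∈ pvEdges matrix,
          (pvCompOf components).get? uv.1 = some a ∧ (pvCompOf components).get? uv.2 = some b := by
  unfold pvCPairs
  have hgen : ∀ (l : List (Int × Int)) (s0 : PySem.Set (Int × Int)),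
      ((a, b) ∈ l.foldl (fun s uv =>
        match (pvCompOf components).get? uv.1 with
        | none => s
        | some x =>
          match (pvCompOf components).get? uv.2 with
          | none => s
          | some y => PySem.Set.add s (x, y)) s0)
      ↔ (a, b) ∈ s0 ∨ ∃ uv ∈ l,
          (pvCompOf components).get? uv.1 = some a ∧ (pvCompOf components).get? uv.2 = some b := by
    intro l
    induction l with
    | nil => intro s0; simp
    | cons uv l ih =>
      intro s0
      simp only [List.foldl_cons]
      rw [ih]
      cases hA : (pvCompOf components).get? uv.1 with
      | none =>
          constructor
          · rintro (h | h)
            · exact Or.inl h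
            · exact Or.inr (h.imp (fun uv' h' => ⟨List.mem_cons_of_mem _ h'.1, h'.2⟩))
          · rintro (h | ⟨uv', huv', h1, h2⟩)
            · exact Or.inl h
            · rcases List.mem_cons.mp huv' with rfl | hm
              · rw [hA] at h1; exact absurd h1 (by simp)
              · exact Or.inr ⟨uv', hm, h1, h2⟩
      | some x =>
        cases hB : (pvCompOf components).get? uv.2 with
        | none =>
          constructor
          · rintro (h | h)
            · exact Or.inl h
            · exact Or.inr (h.imp (fun uv' h' => ⟨List.mem_cons_of_mem _ h'.1, h'.2⟩))
          · rintro (h | ⟨uv', huv', h1, h2⟩)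
            · exact Or.inl h
            · rcases List.mem_cons.mp huv' with rfl | hm
              · rw [hB] at h2; exact absurd h2 (by simp)
              · exact Or.inr ⟨uv', hm, h1, h2⟩
        | some y =>
          rw [PySem.Set.mem_add]
          constructor
          · rintro ((h | h) | h)
            · exact Or.inl h
            · simp only [Prod.mk.injEq] at h
              exact Or.inr ⟨uv, List.mem_cons_self, by rw [hA, h.1], by rw [hB, h.2]⟩
            · exact Or.inr (h.imp (fun uv' h' => ⟨List.mem_cons_of_mem _ h'.1, h'.2⟩))
          · rintro (h | ⟨uv', huv', h1, h2⟩)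
            · exact Or.inl (Or.inl h)
            · rcases List.mem_cons.mp huv' with rfl | hm
              · rw [hA] at h1; rw [hB] at h2
                simp only [Option.some.injEq] at h1 h2
                exact Or.inl (Or.inr (by rw [h1, h2]))
              · exact Or.inr ⟨uv', hm, h1, h2⟩
  rw [hgen]
  simp [PySem.Set.empty]

lemma pvCond_iff (matrix components : List (List Int)) (p q : Nat) :
    (∃ i ∈ List.range matrix.length, ∃ j ∈ List.range (matrix.getD i []).length,
        pvHit matrix (pvBuildIndex components) i j = some (p, q))
    ↔ (p ≠ q ∧ ((p : Int), (q : Int)) ∈ pvCPairs matrix components) := by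
  constructor
  · rintro ⟨i, hi, j, hj, hhit⟩
    unfold pvHit at hhit
    by_cases hcell : (matrix.getD i []).getD j 0 ≠ 0
    swap
    · rw [if_neg hcell] at hhit; simp at hhit
    rw [if_pos hcell] at hhit
    cases hA : (pvBuildIndex components).get? ((i : Int) + 1) with
    | none => rw [hA] at hhit; simp at hhit
    | some A =>
      cases hB : (pvBuildIndex components).get? ((j : Int) + 1) with
      | none => rw [hA, hB] at hhit; simp at hhit
      | some B =>
        rw [hA, hB] at hhit
        replace hhit : (if A ≠ B then some (A.toNat, B.toNat) else none) = some (p, q) := hhit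
        by_cases hab : A ≠ B
        swap
        · rw [if_neg hab] at hhit; exact absurd hhit (by simp)
        rw [if_pos hab] at hhit
        obtain ⟨kA, hkA, rfl, -⟩ := pvVi_some components _ A hA
        obtain ⟨kB, hkB, rfl, -⟩ := pvVi_some components _ B hB
        simp only [Option.some.injEq, Prod.mk.injEq, Int.toNat_natCast] at hhit
        obtain ⟨rfl, rfl⟩ := hhit
        refine ⟨fun h => hab (by rw [h]), ?_⟩
        rw [pvMem_cpairs]
        refine ⟨((i : Int) + 1, (j : Int) + 1), ?_, ?_, ?_⟩
        · rw [pvMem_edges]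
          exact ⟨i, hi, j, hj, hcell, rfl, rfl⟩
        · rw [pvCompOf_eq]; exact hA
        · rw [pvCompOf_eq]; exact hB
  · rintro ⟨hpq, hmem⟩
    rw [pvMem_cpairs] at hmem
    obtain ⟨uv, huv, h1, h2⟩ := hmem
    obtain ⟨u, v⟩ := uv
    rw [pvMem_edges] at huv
    obtain ⟨i, hi, j, hj, hc, rfl, rfl⟩ := huv
    refine ⟨i, hi, j, hj, ?_⟩
    unfold pvHit
    rw [if_pos hc]
    rw [pvCompOf_eq] at h1 h2
    rw [h1, h2]
    show (if ((p : Int) ≠ (q : Int)) then some (((p : Int)).toNat, ((q : Int)).toNat) else none)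
        = some (p, q)
    rw [if_pos (by exact_mod_cast hpq : ((p : Int) ≠ (q : Int)))]
    simp

-- ===== VERDICT (by name: the statement is the Claim_ definition above) =====
theorem condensation_matrix_spec : Claim_equal_condensation_matrix := by
  intro matrix components _ _
  unfold Spec_condensation_matrix
  have hA := pvShape_A matrix components
  have hB := pvShape_B matrix components
  apply List.ext_getElem (by rw [hA.1, hB.1])
  intro p h1 h2
  have hp : p < components.length := by rw [hA.1] at h1; exact h1
  have hlA : (condensation_matrix matrix components)[p].length = components.length := by
    rw [← List.getD_eq_getElem _ [] h1]; exact hA.2 p hp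
  have hlB : (condensation_matrix_alt matrix components)[p].length = components.length := by
    rw [← List.getD_eq_getElem _ [] h2]; exact hB.2 p hp
  apply List.ext_getElem (by rw [hlA, hlB])
  intro q hq1 hq2
  have hq : q < components.length := by rw [hlA] at hq1; exact hq1
  have eA : (condensation_matrix matrix components)[p][q]
      = pvEntry (condensation_matrix matrix components) p q := by
    unfold pvEntry
    rw [List.getD_eq_getElem _ [] h1, List.getD_eq_getElem _ 0 hq1]
  have eB : (condensation_matrix_alt matrix components)[p][q]
      = pvEntry (condensation_matrix_alt matrix components) p q := by
    unfold pvEntry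
    rw [List.getD_eq_getElem _ [] h2, List.getD_eq_getElem _ 0 hq2]
  rw [eA, eB, pvA_entry, pvB_entry matrix components p q hp hq]
  exact if_congr (pvCond_iff matrix components p q) rfl rfl
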